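-- pv_equiv track=rewrite | github.com/Shalor16/algorithm_practice | Heap/더_맵게/solution.py | solution
-- ===== SOURCE A (Python) =====
-- import heapq
--
-- def solution(scoville, K):
--     answer = 0
--     heapq.heapify(scoville) # make scoville list to heap
--
--     while 1:
--
--         if scoville[0] < K: # if scoville[0] is lower than K, there need to be mixing process
--             # if mixing is continued, one data will be storeed in scoville heap at the end. In that moment, scoville[0] is lower than K
--             # that means fail to make higher than K. So stop return -1
--             if len(scoville) == 1:
--                 return -1
--             # get minimum value and next minimum value
--             a = heapq.heappop(scoville)
--             b = heapq.heappop(scoville)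
--             heapq.heappush(scoville, a + 2 * b)
--             answer += 1
--         else:   # every scoville is higher or same as K. So stop then return the answer
--             break
--     return answer
-- ===== SOURCE B (Python) =====
-- def solution(scoville, K):
--     # Heap-free selection-by-scan: each iteration one linear pass finds the minimum
--     # and the second minimum, removes them by value and appends the mix.
--     # Works on a copy: the input list is not mutated (A heapifies/pops it in place);
--     # the return value is the same.
--     pot = list(scoville)
--     answer = 0
--     while True:
--         lo = hi = None
--         for x in pot:
--             if lo is None or x < lo:
--                 lo, hi = x, lo
--             elif hi is None or x < hi:
--                 hi = x
--         if lo >= K: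
--             return answer
--         if hi is None:
--             return -1
--         pot.remove(lo)
--         pot.remove(hi)
--         pot.append(lo + 2 * hi)
--         answer += 1
-- ===== Notes on version B (the rewrite author's own statement) =====
-- stated objective: alternative
-- what changed: Drops the heap entirely: each iteration a single linear scan finds the minimum and the second minimum, removes both by value and appends the mix; no heap and no ordering structure is ever maintained, and the input list is not mutated (A heapifies and pops it in place).
import Mathlib
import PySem

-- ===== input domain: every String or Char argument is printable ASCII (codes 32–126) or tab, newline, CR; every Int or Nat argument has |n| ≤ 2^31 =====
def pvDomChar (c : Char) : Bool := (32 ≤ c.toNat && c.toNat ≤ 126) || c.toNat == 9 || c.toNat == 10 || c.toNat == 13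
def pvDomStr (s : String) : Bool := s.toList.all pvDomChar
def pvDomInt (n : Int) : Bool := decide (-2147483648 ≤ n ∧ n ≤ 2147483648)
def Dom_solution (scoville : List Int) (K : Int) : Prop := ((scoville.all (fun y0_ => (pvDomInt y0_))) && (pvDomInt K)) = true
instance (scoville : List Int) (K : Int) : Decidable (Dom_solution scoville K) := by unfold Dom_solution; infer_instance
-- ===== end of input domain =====

-- B drops the heap: each iteration one linear scan finds the minimum and second minimum,
-- removes them by value and appends the mix. Equivalence is about the RETURN value only
-- (A heapifies/pops the argument list in place; B works on a copy).

-- ===== PORT A =====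
-- A's heapq calls are ported by their contract: the heap's root (scoville[0]) is the minimum of
-- the stored multiset, heappop removes one occurrence of that minimum, heappush adds an element,
-- heapify reorders in place. A's return value depends only on that multiset behaviour, so the
-- port carries the heap as the plain list of stored elements; this is exact for the return value.
def heapMixA (K : Int) (heap : List Int) (answer : Int) : Int :=
  match hm : PySem.List.min? heap (fun x => x) with
  | none => 0    -- unreachable: Python raises IndexError on scoville[0] (excluded by Pre_)
  | some a =>
    if a < K then
      if heap.length = 1 then -1
      else
        let rest := heap.erase a
        match hb : PySem.List.min? rest (fun x => x) with
        | none => 0    -- unreachable: here heap has ≥ 2 elements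
        | some b => heapMixA K ((a + 2 * b) :: rest.erase b) (answer + 1)
    else answer
termination_by heap.length
decreasing_by
  have ha : a ∈ heap := PySem.List.min?_mem hm
  have hb' : b ∈ heap.erase a := PySem.List.min?_mem hb
  have h1 : (heap.erase a).length = heap.length - 1 := List.length_erase_of_mem ha
  have h2 : ((heap.erase a).erase b).length = (heap.erase a).length - 1 :=
    List.length_erase_of_mem hb'
  have h0 : heap ≠ [] := by rintro rfl; simp [PySem.List.min?] at hm
  simp only [List.length_cons, h2, h1]
  have : 0 < heap.length := List.length_pos_of_ne_nil h0
  omega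

def solution (scoville : List Int) (K : Int) : Int :=
  heapMixA K scoville 0

-- ===== PORT B =====
-- the body of `for x in pot: if lo is None or x < lo: lo, hi = x, lo elif hi is None or x < hi: hi = x`
def stepB (st : Option Int × Option Int) (x : Int) : Option Int × Option Int :=
  match st with
  | (none, _) => (some x, none)            -- lo is None: `lo, hi = x, lo` with lo = None
  | (some l, h) =>
    if x < l then (some x, some l)         -- `lo, hi = x, lo`
    else
      match h with
      | none => (some l, some x)           -- `hi is None: hi = x`
      | some hv => if x < hv then (some l, some x) else (some l, some hv)

def potMixB (K : Int) (pot : List Int) (answer : Int) : Int :=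
  match pot.foldl stepB (none, none) with
  | (none, _) => 0    -- unreachable: Python raises TypeError on `None >= K` (empty pot, excluded by Pre_)
  | (some lo, hi) =>
    if K ≤ lo then answer          -- `if lo >= K: return answer`
    else
      match hi with
      | none => -1                 -- `if hi is None: return -1`
      | some h =>
        match hr1 : PySem.List.remove? pot lo with     -- pot.remove(lo)
        | none => 0                -- unreachable: lo ∈ pot
        | some pot1 =>
          match hr2 : PySem.List.remove? pot1 h with   -- pot.remove(hi)
          | none => 0              -- unreachable: hi ∈ pot after removing lo
          | some pot2 => potMixB K (pot2 ++ [lo + 2 * h]) (answer + 1)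
termination_by pot.length
decreasing_by
  have m1 : lo ∈ pot := by
    by_contra hmem
    rw [(PySem.List.remove?_eq_none_iff pot lo).2 hmem] at hr1
    simp at hr1
  have e1 : pot1 = pot.erase lo := by
    have h := PySem.List.remove?_eq_some_erase pot lo m1
    rw [h] at hr1; exact (Option.some_inj.1 hr1.symm)
  have m2 : h ∈ pot1 := by
    by_contra hmem
    rw [(PySem.List.remove?_eq_none_iff pot1 h).2 hmem] at hr2
    simp at hr2
  have e2 : pot2 = pot1.erase h := by
    have h' := PySem.List.remove?_eq_some_erase pot1 h m2
    rw [h'] at hr2; exact (Option.some_inj.1 hr2.symm)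
  have h1 : pot1.length = pot.length - 1 := e1 ▸ List.length_erase_of_mem m1
  have h2 : pot2.length = pot1.length - 1 := e2 ▸ List.length_erase_of_mem m2
  have l1 : 0 < pot.length := List.length_pos_of_mem m1
  have l2 : 0 < pot1.length := List.length_pos_of_mem m2
  simp only [List.length_append, List.length_cons, List.length_nil, h2, h1]
  omega

def solution_alt (scoville : List Int) (K : Int) : Int :=
  potMixB K scoville 0

-- ===== PRECONDITION & SPEC =====
-- Pre_ excludes only the empty list, on which both Pythons raise (A: IndexError, B: TypeError).
def Pre_solution (scoville : List Int) (K : Int) : Prop := scoville ≠ []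
instance (scoville : List Int) (K : Int) : Decidable (Pre_solution scoville K) := by
  unfold Pre_solution; infer_instance

def pvWitness_solution : List Int × Int := ([1, 2, 3, 9, 10, 12], 7)

def Spec_solution (scoville : List Int) (K : Int) (out : Int) : Prop := out = solution_alt scoville K
instance (scoville : List Int) (K : Int) (out : Int) : Decidable (Spec_solution scoville K out) := by unfold Spec_solution; infer_instance

-- ===== CLAIM =====
def Claim_equal_solution : Prop := ∀ (scoville : List Int) (K : Int), Dom_solution scoville K → Pre_solution scoville K → Spec_solution scoville K (solution scoville K)

-- ===== LEMMAS AND PROOFS =====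

-- equation lemmas for A's loop
theorem heapMixA_stop (K : Int) (heap : List Int) (ans a : Int)
    (hm : PySem.List.min? heap (fun x => x) = some a) (hK : ¬ a < K) :
    heapMixA K heap ans = ans := by
  rw [heapMixA]
  split
  · rename_i heq; rw [hm] at heq; cases heq
  · rename_i a' heq; rw [hm] at heq; cases heq; rw [if_neg hK]

theorem heapMixA_fail (K : Int) (heap : List Int) (ans a : Int)
    (hm : PySem.List.min? heap (fun x => x) = some a) (hK : a < K)
    (hlen : heap.length = 1) :
    heapMixA K heap ans = -1 := by
  rw [heapMixA]
  split
  · rename_i heq; rw [hm] at heq; cases heq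
  · rename_i a' heq; rw [hm] at heq; cases heq; rw [if_pos hK, if_pos hlen]

theorem heapMixA_step (K : Int) (heap : List Int) (ans a b : Int)
    (hm : PySem.List.min? heap (fun x => x) = some a) (hK : a < K)
    (hlen : heap.length ≠ 1)
    (hb : PySem.List.min? (heap.erase a) (fun x => x) = some b) :
    heapMixA K heap ans = heapMixA K ((a + 2 * b) :: (heap.erase a).erase b) (ans + 1) := by
  rw [heapMixA]
  split
  · rename_i heq; rw [hm] at heq; cases heq
  · rename_i a' heq; rw [hm] at heq; cases heq
    rw [if_pos hK, if_neg hlen]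
    show (match hb' : PySem.List.min? (heap.erase a) (fun x => x) with
      | none => (0 : Int)
      | some b => heapMixA K ((a + 2 * b) :: (heap.erase a).erase b) (ans + 1)) = _
    split
    · rename_i heq2; rw [hb] at heq2; cases heq2
    · rename_i b' heq2; rw [hb] at heq2; cases heq2; rfl

-- equation lemmas for B's loop
theorem potMixB_nil (K : Int) (ans : Int) : potMixB K [] ans = 0 := by
  rw [potMixB]; rfl

theorem potMixB_stop (K : Int) (pot : List Int) (ans lo : Int) (hi : Option Int)
    (hst : pot.foldl stepB (none, none) = (some lo, hi)) (hK : K ≤ lo) :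
    potMixB K pot ans = ans := by
  rw [potMixB]
  split
  · rename_i heq; rw [hst] at heq; cases heq
  · rename_i lo' hi' heq; rw [hst] at heq; cases heq; rw [if_pos hK]

theorem potMixB_fail (K : Int) (pot : List Int) (ans lo : Int)
    (hst : pot.foldl stepB (none, none) = (some lo, none)) (hK : ¬ K ≤ lo) :
    potMixB K pot ans = -1 := by
  rw [potMixB]
  split
  · rename_i heq; rw [hst] at heq; cases heq
  · rename_i lo' hi' heq; rw [hst] at heq; cases heq; rw [if_neg hK]

theorem potMixB_step (K : Int) (pot : List Int) (ans lo h : Int)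
    (hst : pot.foldl stepB (none, none) = (some lo, some h)) (hK : ¬ K ≤ lo)
    (hlo : lo ∈ pot) (hh : h ∈ pot.erase lo) :
    potMixB K pot ans
      = potMixB K ((pot.erase lo).erase h ++ [lo + 2 * h]) (ans + 1) := by
  rw [potMixB]
  split
  · rename_i heq; rw [hst] at heq; cases heq
  · rename_i lo' hi' heq; rw [hst] at heq; cases heq
    rw [if_neg hK]
    split
    · rename_i heq0; cases heq0
    · rename_i h' heq0
      cases heq0
      split
      · rename_i heq1
        rw [PySem.List.remove?_eq_some_erase pot lo hlo] at heq1; cases heq1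
      · rename_i pot1 heq1
        rw [PySem.List.remove?_eq_some_erase pot lo hlo] at heq1
        cases heq1
        split
        · rename_i heq2
          rw [PySem.List.remove?_eq_some_erase (pot.erase lo) h hh] at heq2; cases heq2
        · rename_i pot2 heq2
          rw [PySem.List.remove?_eq_some_erase (pot.erase lo) h hh] at heq2
          cases heq2; rfl

-- invariant of B's scan: the state is (min, second-min) of the processed prefix
def ScanInv (p : List Int) (st : Option Int × Option Int) : Prop :=
  (st = (none, none) ∧ p = []) ∨
  (∃ l, st = (some l, none) ∧ p = [l]) ∨
  (∃ l h rest, st = (some l, some h) ∧ p.Perm (l :: h :: rest) ∧ l ≤ h ∧ ∀ y ∈ rest, h ≤ y)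

theorem scanInv_step (p : List Int) (st : Option Int × Option Int) (x : Int)
    (hinv : ScanInv p st) : ScanInv (p ++ [x]) (stepB st x) := by
  rcases hinv with ⟨hst, hp⟩ | ⟨l, hst, hp⟩ | ⟨l, h, rest, hst, hp, hlh, hrest⟩
  · subst hst hp
    exact Or.inr (Or.inl ⟨x, rfl, rfl⟩)
  · subst hst hp
    by_cases hx : x < l
    · exact Or.inr (Or.inr ⟨x, l, [], by simp [stepB, hx], by
        exact List.Perm.swap x l [], by omega, by simp⟩)
    · exact Or.inr (Or.inr ⟨l, x, [], by simp [stepB, hx], List.Perm.refl _, by omega, by simp⟩)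
  · subst hst
    have base : (p ++ [x]).Perm (x :: l :: h :: rest) :=
      (List.perm_append_singleton x p).trans (hp.cons x)
    by_cases hx : x < l
    · refine Or.inr (Or.inr ⟨x, l, h :: rest, by simp [stepB, hx], base, by omega, ?_⟩)
      intro y hy
      rcases List.mem_cons.1 hy with rfl | hy'
      · exact hlh
      · exact le_trans hlh (hrest y hy')
    · by_cases hx2 : x < h
      · refine Or.inr (Or.inr ⟨l, x, h :: rest, by simp [stepB, hx, hx2],
          base.trans (List.Perm.swap l x _), by omega, ?_⟩)
        intro y hy
        rcases List.mem_cons.1 hy with rfl | hy'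
        · omega
        · exact le_trans (by omega) (hrest y hy')
      · refine Or.inr (Or.inr ⟨l, h, x :: rest, by simp [stepB, hx, hx2],
          (base.trans (List.Perm.swap l x _)).trans ((List.Perm.swap h x rest).cons l),
          hlh, ?_⟩)
        intro y hy
        rcases List.mem_cons.1 hy with rfl | hy'
        · omega
        · exact hrest y hy'

theorem scanInv_foldl : ∀ (xs p : List Int) (st : Option Int × Option Int),
    ScanInv p st → ScanInv (p ++ xs) (xs.foldl stepB st) := by
  intro xs
  induction xs with
  | nil => intro p st h; simpa using h
  | cons x t ih =>
    intro p st h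
    have := ih (p ++ [x]) (stepB st x) (scanInv_step p st x h)
    simpa using this

theorem scanInv_full (pot : List Int) : ScanInv pot (pot.foldl stepB (none, none)) := by
  have := scanInv_foldl pot [] (none, none) (Or.inl ⟨rfl, rfl⟩)
  simpa using this

-- the main invariant: A's heap and B's pot hold the same multiset
theorem mix_eq (K : Int) : ∀ (n : ℕ) (heap pot : List Int) (ans : Int),
    heap.length ≤ n → heap.Perm pot →
    heapMixA K heap ans = potMixB K pot ans := by
  intro n
  induction n with
  | zero =>
    intro heap pot ans hn hperm
    have h1 : heap = [] := List.eq_nil_of_length_eq_zero (by omega)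
    subst h1
    have h2 : pot = [] := hperm.symm.eq_nil
    subst h2
    rw [heapMixA, potMixB_nil]
    rfl
  | succ n ih =>
    intro heap pot ans hn hperm
    rcases scanInv_full pot with ⟨hst, hp⟩ | ⟨l, hst, hp⟩ | ⟨l, h, rest, hst, hp, hlh, hrest⟩
    · -- pot = [], heap = []: both ports return 0
      subst hp
      have h1 : heap = [] := hperm.eq_nil
      subst h1
      rw [heapMixA, potMixB_nil]
      rfl
    · -- singleton
      subst hp
      have hh : heap = [l] := List.perm_singleton.1 hperm
      subst hh
      have hminl : PySem.List.min? [l] (fun x : Int => x) = some l := by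
        simp [PySem.List.min?]
      by_cases hK : l < K
      · rw [heapMixA_fail K [l] ans l hminl hK (by simp),
            potMixB_fail K [l] ans l hst (by omega)]
      · rw [heapMixA_stop K [l] ans l hminl hK,
            potMixB_stop K [l] ans l none hst (by omega)]
    · -- at least two elements
      have hmin_pot : ∀ y ∈ pot, l ≤ y := by
        intro y hy
        rcases List.mem_cons.1 (hp.mem_iff.1 hy) with rfl | hy'
        · omega
        rcases List.mem_cons.1 hy' with rfl | hy''
        · exact hlh
        · exact le_trans hlh (hrest y hy'')
      -- A's first pop returns the same minimum value l
      have hne : heap ≠ [] := by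
        intro hnil
        have h2 : pot = [] := (hnil ▸ hperm).symm.eq_nil
        rw [h2] at hst
        simp [List.foldl] at hst
      obtain ⟨a, hm⟩ : ∃ a, PySem.List.min? heap (fun x => x) = some a := by
        cases hma : PySem.List.min? heap (fun x => x) with
        | none => exact absurd ((PySem.List.min?_eq_none_iff _ _).1 hma) hne
        | some a => exact ⟨a, rfl⟩
      have hamem : a ∈ heap := PySem.List.min?_mem hm
      have hal : a = l := by
        refine le_antisymm (PySem.List.min?_isMin hm l ?_) (hmin_pot a (hperm.mem_iff.1 hamem))
        exact hperm.mem_iff.2 (hp.mem_iff.2 (by simp))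
      subst hal
      by_cases hK : a < K
      · have hlen : heap.length = rest.length + 2 := by
          have := (hperm.trans hp).length_eq; simpa using this
        -- A's second pop returns the same second minimum h
        have hrest_perm : (heap.erase a).Perm (h :: rest) := by
          have h1 := (hperm.trans hp).erase a
          rwa [List.erase_cons_head] at h1
        have hmin_rest : ∀ y ∈ h :: rest, h ≤ y := by
          intro y hy
          rcases List.mem_cons.1 hy with rfl | hy'
          · omega
          · exact hrest y hy'
        obtain ⟨b, hb⟩ : ∃ b, PySem.List.min? (heap.erase a) (fun x => x) = some b := by
          cases hmb : PySem.List.min? (heap.erase a) (fun x => x) with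
          | none =>
            exact absurd ((PySem.List.min?_eq_none_iff _ _).1 hmb)
              (by intro hnil; exact List.cons_ne_nil h rest (hnil ▸ hrest_perm).symm.eq_nil)
          | some b => exact ⟨b, rfl⟩
        have hbmem : b ∈ heap.erase a := PySem.List.min?_mem hb
        have hbh : b = h := by
          refine le_antisymm
            (PySem.List.min?_isMin hb h (hrest_perm.mem_iff.2 (by simp))) ?_
          exact hmin_rest b (hrest_perm.mem_iff.1 hbmem)
        subst hbh
        -- B's two removes succeed on the same two values
        have hlmem : a ∈ pot := hp.mem_iff.2 (by simp)
        have hbmem2 : b ∈ pot.erase a := by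
          have h1 := hp.erase a
          rw [List.erase_cons_head] at h1
          exact h1.mem_iff.2 (by simp)
        rw [heapMixA_step K heap ans a b hm hK (by omega) hb,
            potMixB_step K pot ans a b hst (by omega) hlmem hbmem2]
        -- recurse via ih with the multiset invariant
        have hperm2 : ((heap.erase a).erase b).Perm ((pot.erase a).erase b) :=
          (hperm.erase a).erase b
        have hperm' : ((a + 2 * b) :: (heap.erase a).erase b).Perm
            ((pot.erase a).erase b ++ [a + 2 * b]) :=
          (hperm2.cons _).trans (List.perm_append_singleton _ _).symm
        apply ih _ _ _ _ hperm'
        have h1 : (heap.erase a).length = heap.length - 1 := List.length_erase_of_mem hamem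
        have h2 : ((heap.erase a).erase b).length = (heap.erase a).length - 1 :=
          List.length_erase_of_mem hbmem
        simp only [List.length_cons, h2, h1]
        omega
      · rw [heapMixA_stop K heap ans a hm hK,
            potMixB_stop K pot ans a (some h) hst (by omega)]

-- ===== VERDICT =====
theorem solution_spec : Claim_equal_solution := by
  intro scoville K _ _
  unfold Spec_solution solution solution_alt
  exact mix_eq K scoville.length scoville scoville 0 (le_refl _) (List.Perm.refl _)
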